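-- pv_equiv track=rewrite | github.com/Marco55555555/CNYT-2 | TAREA2.py | PriV
-- ===== SOURCE A (Python) =====
-- def pro(NUM1,NUM2):
--     res = (NUM1[0]*NUM2[0]-NUM1[1]*NUM2[1],NUM1[0]*NUM2[1]+NUM2[0]*NUM1[1])
--     return res
--
-- def conj(NUM1):
--     res = (NUM1[0],(-1)*NUM1[1])
--     return res
--
-- def AdjV(Data1):
--     res = []
--     for i in range(len(Data1)):
--         res.append(conj(Data1[i]))
--     return res
--
-- def PriV(Data1,Data2):
--     Data1 = AdjV(Data1)
--     Rp = 0
--     Ip = 0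
--     for i in range(len(Data1)):
--         Rp += pro(Data1[i],Data2[i])[0]
--         Ip += pro(Data1[i],Data2[i])[1]
--     return (Rp,Ip)
-- ===== SOURCE B (Python) =====
-- def PriV(Data1, Data2):
--     Rp = 0
--     Ip = 0
--     for (a, b), (c, d) in zip(Data1, Data2):
--         Rp += a * c + b * d
--         Ip += a * d - b * c
--     return (Rp, Ip)
-- ===== Notes on version B (the rewrite author's own statement) =====
-- stated objective: simpler
-- what changed: B fuses A's separate adjoint-list pass and its doubled pro() calls per index into one zip loop that accumulates both sums directly from the expanded conjugate-product formula, with no helper functions and no intermediate list.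
import Mathlib
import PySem

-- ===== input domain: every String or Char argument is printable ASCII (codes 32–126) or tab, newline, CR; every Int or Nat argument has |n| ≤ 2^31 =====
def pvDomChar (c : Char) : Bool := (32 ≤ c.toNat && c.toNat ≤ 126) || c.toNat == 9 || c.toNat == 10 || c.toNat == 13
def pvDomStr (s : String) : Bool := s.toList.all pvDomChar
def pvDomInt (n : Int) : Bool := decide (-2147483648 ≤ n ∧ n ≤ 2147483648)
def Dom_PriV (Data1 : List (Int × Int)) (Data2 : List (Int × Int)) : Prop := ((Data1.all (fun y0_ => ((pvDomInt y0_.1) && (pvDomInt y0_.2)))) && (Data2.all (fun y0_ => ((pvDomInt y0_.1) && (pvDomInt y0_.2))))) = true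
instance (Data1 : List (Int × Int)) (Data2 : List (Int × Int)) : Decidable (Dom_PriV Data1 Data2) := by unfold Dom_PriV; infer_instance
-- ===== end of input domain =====

-- B replaces A's adjoint-list pass plus doubled pro() calls with a single fused zip loop
-- accumulating both components of the conjugate inner product directly (same O(n) cost, simpler).

-- ===== PORT A =====
def pro (NUM1 NUM2 : Int × Int) : Int × Int :=
  (NUM1.1 * NUM2.1 - NUM1.2 * NUM2.2, NUM1.1 * NUM2.2 + NUM2.1 * NUM1.2)

def conj (NUM1 : Int × Int) : Int × Int := (NUM1.1, (-1) * NUM1.2)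

def AdjV (Data1 : List (Int × Int)) : List (Int × Int) :=
  (PySem.List.pyRange 0 (PySem.List.len Data1) 1).foldl
    (fun res i => res ++ [conj (PySem.List.pyGetD Data1 i (0, 0))]) []

def PriV (Data1 : List (Int × Int)) (Data2 : List (Int × Int)) : Int × Int :=
  let D := AdjV Data1
  (PySem.List.pyRange 0 (PySem.List.len D) 1).foldl
    (fun s i =>
      (s.1 + (pro (PySem.List.pyGetD D i (0, 0)) (PySem.List.pyGetD Data2 i (0, 0))).1,
       s.2 + (pro (PySem.List.pyGetD D i (0, 0)) (PySem.List.pyGetD Data2 i (0, 0))).2))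
    (0, 0)

-- ===== PORT B =====
def PriV_alt (Data1 : List (Int × Int)) (Data2 : List (Int × Int)) : Int × Int :=
  (Data1.zip Data2).foldl
    (fun s p =>
      (s.1 + p.1.1 * p.2.1 + p.1.2 * p.2.2, s.2 + p.1.1 * p.2.2 - p.1.2 * p.2.1))
    (0, 0)

-- ===== PRECONDITION & SPEC =====
-- A raises IndexError reading Data2[i] exactly when Data2 is shorter than Data1.
def Pre_PriV (Data1 : List (Int × Int)) (Data2 : List (Int × Int)) : Prop :=
  Data1.length ≤ Data2.length
instance (Data1 : List (Int × Int)) (Data2 : List (Int × Int)) : Decidable (Pre_PriV Data1 Data2) := by unfold Pre_PriV; infer_instance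

def pvWitness_PriV : (List (Int × Int)) × (List (Int × Int)) := ([(1, 2), (3, -1)], [(0, 1), (2, 2)])

def Spec_PriV (Data1 : List (Int × Int)) (Data2 : List (Int × Int)) (out : Int × Int) : Prop := out = PriV_alt Data1 Data2
instance (Data1 : List (Int × Int)) (Data2 : List (Int × Int)) (out : Int × Int) : Decidable (Spec_PriV Data1 Data2 out) := by unfold Spec_PriV; infer_instance

-- ===== CLAIM (what is proved, stated in full; the proofs are below) =====
def Claim_equal_PriV : Prop := ∀ (Data1 : List (Int × Int)) (Data2 : List (Int × Int)), Dom_PriV Data1 Data2 → Pre_PriV Data1 Data2 → Spec_PriV Data1 Data2 (PriV Data1 Data2)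

-- ===== LEMMAS AND PROOFS =====

lemma AdjV_eq_map (Data1 : List (Int × Int)) : AdjV Data1 = Data1.map conj := by
  unfold AdjV
  rw [PySem.List.len_eq,
      PySem.List.foldl_pyRange_zero_pyGetD' Data1 (0, 0) (fun acc x => acc ++ [conj x]) [],
      PySem.List.foldl_append_eq_flatMap]
  induction Data1 <;> simp_all

lemma foldl_idx_eq_zip {α β γ : Type} (xs : List α) (ys : List β) (dx : α) (dy : β)
    (f : γ → α → β → γ) (init : γ) (h : xs.length ≤ ys.length) :
    (PySem.List.pyRange 0 (PySem.List.len xs) 1).foldl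
      (fun s i => f s (PySem.List.pyGetD xs i dx) (PySem.List.pyGetD ys i dy)) init
    = (xs.zip ys).foldl (fun s p => f s p.1 p.2) init := by
  have hlen : (xs.zip ys).length = xs.length := by
    simp [List.length_zip]; omega
  have hcongr :
      (PySem.List.pyRange 0 (PySem.List.len xs) 1).foldl
        (fun s i => f s (PySem.List.pyGetD xs i dx) (PySem.List.pyGetD ys i dy)) init
      = (PySem.List.pyRange 0 (PySem.List.len (xs.zip ys)) 1).foldl
        (fun s i => f s (PySem.List.pyGetD (xs.zip ys) i (dx, dy)).1
                       (PySem.List.pyGetD (xs.zip ys) i (dx, dy)).2) init := by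
    rw [PySem.List.len_eq, PySem.List.len_eq, hlen]
    refine PySem.List.foldl_congr_mem _ _ _ _ (fun acc i hi => ?_)
    rw [PySem.List.mem_pyRange_one] at hi
    obtain ⟨h0, hlt⟩ := hi
    have hx : i < (xs.length : Int) := hlt
    have hy : i < (ys.length : Int) := by omega
    have hz : i < ((xs.zip ys).length : Int) := by rw [hlen]; exact hx
    rw [PySem.List.pyGetD_eq_getElem xs dx h0 hx,
        PySem.List.pyGetD_eq_getElem ys dy h0 hy,
        PySem.List.pyGetD_eq_getElem (xs.zip ys) (dx, dy) h0 hz]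
    simp [List.getElem_zip]
  rw [hcongr, PySem.List.len_eq,
      PySem.List.foldl_pyRange_zero_pyGetD' (xs.zip ys) (dx, dy) (fun s p => f s p.1 p.2) init]

-- ===== VERDICT (by name: the statement is the Claim_ definition above) =====
theorem PriV_spec : Claim_equal_PriV := by
  intro Data1 Data2 _ hpre
  unfold Spec_PriV PriV PriV_alt
  rw [AdjV_eq_map]
  rw [foldl_idx_eq_zip (Data1.map conj) Data2 (0, 0) (0, 0)
      (fun s a b => (s.1 + (pro a b).1, s.2 + (pro a b).2)) (0, 0)
      (by simpa using hpre)]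
  rw [List.zip_map_left, List.foldl_map]
  refine PySem.List.foldl_congr_mem _ _ _ _ (fun s p _ => ?_)
  simp [pro, conj]
  constructor <;> ring
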